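-- pv_equiv track=rewrite | github.com/nestoru/pdf-extractor | pdf_extractor/sync_to_onedrive.py | normalize_for_comparison
-- ===== SOURCE A (Python) =====
-- def normalize_for_comparison(filename):
--     """
--     Normalize filename for duplicate detection.
--     Removes punctuation and converts to lowercase for comparison only.
--     """
--     # Convert to lowercase
--     normalized = filename.lower()
--     # Remove common punctuation that might differ
--     for char in [',', '.', '!', '?', ';', ':', '-', '_', '(', ')', '[', ']', '{', '}', "'", '"']:
--         normalized = normalized.replace(char, ' ')
--     # Replace multiple spaces with single space and strip
--     normalized = ' '.join(normalized.split())
--     # Remove .pdf extension if present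
--     if normalized.endswith(' pdf'):
--         normalized = normalized[:-4].strip()
--     return normalized
-- ===== SOURCE B (Python) =====
-- def normalize_for_comparison(filename):
--     """
--     Normalize filename for duplicate detection.
--     Removes punctuation and converts to lowercase for comparison only.
--     """
--     punct = set([',', '.', '!', '?', ';', ':', '-', '_', '(', ')', '[', ']', '{', '}', "'", '"'])
--     # Single left-to-right pass: swap punctuation for a space, keep everything else
--     chars = []
--     for ch in filename.lower():
--         chars.append(' ' if ch in punct else ch)
--     # Replace multiple spaces with single space and strip
--     normalized = ' '.join(''.join(chars).split())
--     # Remove .pdf extension if present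
--     if normalized.endswith(' pdf'):
--         normalized = normalized[:-4].strip()
--     return normalized
-- ===== Notes on version B (the rewrite author's own statement) =====
-- stated objective: alternative
-- what changed: Replaces A's sixteen sequential full-string .replace() passes with one left-to-right pass over the lowercased characters against a punctuation set; the whitespace-collapse and pdf-suffix trim steps are kept verbatim.
import Mathlib
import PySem

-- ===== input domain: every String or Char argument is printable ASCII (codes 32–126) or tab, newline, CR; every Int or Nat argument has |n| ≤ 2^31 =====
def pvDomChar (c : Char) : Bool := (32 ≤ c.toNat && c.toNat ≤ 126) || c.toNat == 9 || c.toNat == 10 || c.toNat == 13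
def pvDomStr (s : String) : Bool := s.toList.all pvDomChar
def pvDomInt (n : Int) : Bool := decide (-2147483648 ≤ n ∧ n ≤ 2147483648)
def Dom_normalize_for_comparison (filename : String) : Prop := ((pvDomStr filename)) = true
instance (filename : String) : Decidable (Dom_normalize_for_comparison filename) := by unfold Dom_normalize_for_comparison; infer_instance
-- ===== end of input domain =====

-- B replaces A's sixteen sequential full-string replace passes with one left-to-right pass
-- over the characters against a punctuation set (alternative decomposition, same result).

-- ===== PORT A =====
-- the literal list of punctuation characters from A's for-loop
def pvPunct : List Char :=
  [',', '.', '!', '?', ';', ':', '-', '_', '(', ')', '[', ']', '{', '}', '\'', '"']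

def normalize_for_comparison (filename : String) : String :=
  -- normalized = filename.lower()
  let normalized := PySem.Str.lower filename
  -- for char in [...]: normalized = normalized.replace(char, ' ')
  let normalized := pvPunct.foldl
    (fun n c => PySem.Str.replace n (String.ofList [c]) " ") normalized
  -- normalized = ' '.join(normalized.split())
  let normalized := PySem.Str.join " " (PySem.Str.split₀ normalized)
  -- if normalized.endswith(' pdf'): normalized = normalized[:-4].strip()
  if PySem.Str.endswith normalized " pdf" then
    PySem.Str.strip (PySem.Str.slice normalized none (some (-4)))
  else normalized

-- ===== PORT B =====
def normalize_for_comparison_alt (filename : String) : String :=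
  -- punct = set([...])
  let punct : PySem.Set Char := PySem.Set.ofList pvPunct
  -- chars = []; for ch in filename.lower(): chars.append(' ' if ch in punct else ch)
  let chars := (PySem.Str.lower filename).toList.foldl
    (fun acc ch => acc ++ [if PySem.Set.contains punct ch then ' ' else ch]) ([] : List Char)
  -- normalized = ' '.join(''.join(chars).split())
  let normalized := PySem.Str.join " " (PySem.Str.split₀ (String.ofList chars))
  -- if normalized.endswith(' pdf'): normalized = normalized[:-4].strip()
  if PySem.Str.endswith normalized " pdf" then
    PySem.Str.strip (PySem.Str.slice normalized none (some (-4)))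
  else normalized

-- ===== PRECONDITION & SPEC =====
def Spec_normalize_for_comparison (filename : String) (out : String) : Prop := out = normalize_for_comparison_alt filename
instance (filename : String) (out : String) : Decidable (Spec_normalize_for_comparison filename out) := by unfold Spec_normalize_for_comparison; infer_instance

-- ===== CLAIM (what is proved, stated in full; the proofs are below) =====
def Claim_equal_normalize_for_comparison : Prop := ∀ (filename : String), Dom_normalize_for_comparison filename → Spec_normalize_for_comparison filename (normalize_for_comparison filename)

-- ===== LEMMAS AND PROOFS =====

-- single-character replace is a character map
lemma replace_go_single (c d : Char) :
    ∀ (l : List Char) (fuel : Nat) (acc : List Char), l.length ≤ fuel →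
      PySem.Chars.replace.go [c] [d] fuel l acc
        = acc.reverse ++ l.map (fun x => if x = c then d else x) := by
  intro l
  induction l with
  | nil =>
      intro fuel acc _
      cases fuel <;> simp [PySem.Chars.replace.go]
  | cons x t ih =>
      intro fuel acc hle
      cases fuel with
      | zero => simp at hle
      | succ fuel =>
          rw [PySem.Chars.replace.go]
          by_cases hx : x = c
          · subst hx
            simp only [List.isPrefixOf, BEq.rfl, Bool.true_and, if_pos, List.length_cons, List.length_nil, List.drop_succ_cons, List.drop_zero,
              List.reverse_singleton, List.singleton_append]
            rw [ih fuel (d :: acc) (by simpa using Nat.le_of_succ_le_succ hle)]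
            simp
          · have : ([c].isPrefixOf (x :: t)) = false := by
              simp [List.isPrefixOf]
              exact fun h => absurd h.symm (by simpa using hx)
            rw [this]
            simp only [Bool.false_eq_true, if_neg, not_false_iff]
            rw [ih fuel (x :: acc) (by simpa using Nat.le_of_succ_le_succ hle)]
            simp [hx]

lemma replace_single (s : List Char) (c d : Char) :
    PySem.Chars.replace s [c] [d] = s.map (fun x => if x = c then d else x) := by
  simp [PySem.Chars.replace, replace_go_single c d s s.length [] (le_refl _)]

-- folding single-char→space replaces over a list of chars is one membership-keyed map
lemma foldRep (ps : List Char) (s : List Char) :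
    ps.foldl (fun n c => PySem.Chars.replace n [c] [' ']) s
      = s.map (fun x => if x ∈ ps then ' ' else x) := by
  induction ps generalizing s with
  | nil => simp
  | cons c ps ih =>
      rw [List.foldl_cons, ih, replace_single, List.map_map]
      apply List.map_congr_left
      intro x _
      by_cases hx : x = c
      · rw [hx]; by_cases h' : c ∈ ps <;> simp [h']
      · simp [hx, Function.comp]

-- A's replace fold, lowered from String to List Char
lemma strFold (ps : List Char) (s : String) :
    (ps.foldl (fun n c => PySem.Str.replace n (String.ofList [c]) " ") s).toList
      = ps.foldl (fun n c => PySem.Chars.replace n [c] [' ']) s.toList := by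
  induction ps generalizing s with
  | nil => simp
  | cons c ps ih =>
      rw [List.foldl_cons, List.foldl_cons, ih]
      congr 1
      simp [PySem.Str.replace, show (" " : String).toList = [' '] from by decide]

lemma set_ofList_punct : PySem.Set.ofList pvPunct = pvPunct := by decide

-- both intermediate strings (before join/split) are equal
lemma mid_eq (filename : String) :
    pvPunct.foldl (fun n c => PySem.Str.replace n (String.ofList [c]) " ")
        (PySem.Str.lower filename)
      = String.ofList ((PySem.Str.lower filename).toList.foldl
          (fun acc ch =>
            acc ++ [if PySem.Set.contains (PySem.Set.ofList pvPunct) ch then ' ' else ch])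
          ([] : List Char)) := by
  apply String.ext
  rw [strFold, foldRep, String.toList_ofList,
    PySem.List.foldl_append_singleton_eq_map]
  simp only [List.nil_append]
  apply List.map_congr_left
  intro x _
  rw [set_ofList_punct]
  by_cases hx : x ∈ pvPunct
  · simp [hx]
  · simp [hx]

-- ===== VERDICT (by name: the statement is the Claim_ definition above) =====
theorem normalize_for_comparison_spec : Claim_equal_normalize_for_comparison := by
  intro filename _
  unfold Spec_normalize_for_comparison normalize_for_comparison normalize_for_comparison_alt
  dsimp only
  rw [mid_eq filename]
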